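-- pv_equiv track=rewrite | github.com/tc543/CS4775FinalProject | viterbi.py | find_intervals
-- ===== SOURCE A (Python) =====
-- def find_intervals(sequence):
--     intervals = []
--     in_gc_rich_region = False
--     beginning = None
--     N = len(sequence)
--
--     for i, state in enumerate(sequence):
--         if state == 'h':  # rich state
--             if not in_gc_rich_region:
--                 beginning = i + 1  # start of the region (1-based index)
--                 in_gc_rich_region = True
--         else:  # poor state
--             if in_gc_rich_region:
--                 intervals.append((beginning, i))  # end  current region
--                 in_gc_rich_region = False
--
--     # if the sequence ends while in a G+C-rich region
--     if in_gc_rich_region: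
--         intervals.append((beginning, N))
--
--     return intervals
-- ===== SOURCE B (Python) =====
-- def find_intervals(sequence):
--     # Run-based two-pointer scan: skip over each maximal run at once;
--     # no in-region flag and no end-of-sequence flush needed.
--     intervals = []
--     pos = 0
--     n = len(sequence)
--     while pos < n:
--         state = sequence[pos]
--         end = pos + 1
--         while end < n and sequence[end] == state:
--             end += 1
--         if state == 'h':
--             intervals.append((pos + 1, end))
--         pos = end
--     return intervals
-- ===== Notes on version B (the rewrite author's own statement) =====
-- stated objective: alternative
-- what changed: Replaces the element-by-element scan with an in-region flag, remembered start and final flush by a run-based two-pointer loop that jumps over each maximal run and emits an interval per 'h'-run directly.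
import Mathlib
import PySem

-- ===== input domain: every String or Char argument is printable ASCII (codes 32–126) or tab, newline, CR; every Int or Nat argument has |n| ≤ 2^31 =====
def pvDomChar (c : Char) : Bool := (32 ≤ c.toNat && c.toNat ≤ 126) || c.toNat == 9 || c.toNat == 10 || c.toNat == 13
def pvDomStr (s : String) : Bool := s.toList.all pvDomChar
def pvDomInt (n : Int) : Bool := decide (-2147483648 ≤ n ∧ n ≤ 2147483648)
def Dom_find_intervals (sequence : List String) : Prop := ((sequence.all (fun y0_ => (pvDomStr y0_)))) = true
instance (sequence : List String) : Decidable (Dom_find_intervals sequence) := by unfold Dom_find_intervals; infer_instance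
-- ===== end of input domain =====

-- B replaces A's flag/start/flush element scan by a run-based two-pointer scan (alternative decomposition, same cost).
-- ===== PORT A =====
-- loop state: current index i, accumulated intervals, in_gc_rich_region flag, beginning (0 until first set; only read while flag is true)
def fiGoA : List String → Int → List (Int × Int) → Bool → Int → List (Int × Int)
  | [], i, intervals, inR, beg => if inR then intervals ++ [(beg, i)] else intervals
  | s :: rest, i, intervals, inR, beg =>
    if s == "h" then
      if !inR then fiGoA rest (i + 1) intervals true (i + 1)
      else fiGoA rest (i + 1) intervals true beg
    else
      if inR then fiGoA rest (i + 1) (intervals ++ [(beg, i)]) false beg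
      else fiGoA rest (i + 1) intervals false beg

def find_intervals (sequence : List String) : List (Int × Int) :=
  fiGoA sequence 0 [] false 0

-- ===== PORT B =====
-- run-based scan: the inner `while end < n and sequence[end] == state` is the takeWhile/dropWhile split of the tail
def fiGoB : List String → Int → List (Int × Int)
  | [], _ => []
  | s :: rest, pos =>
    let runLen : Int := 1 + ((rest.takeWhile (· == s)).length : Int)
    (if s == "h" then [(pos + 1, pos + runLen)] else []) ++
      fiGoB (rest.dropWhile (· == s)) (pos + runLen)
termination_by xs _ => xs.length
decreasing_by simpa using Nat.lt_succ_of_le (List.length_dropWhile_le _ _)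

def find_intervals_alt (sequence : List String) : List (Int × Int) :=
  fiGoB sequence 0

-- ===== PRECONDITION & SPEC =====
def Spec_find_intervals (sequence : List String) (out : List (Int × Int)) : Prop := out = find_intervals_alt sequence
instance (sequence : List String) (out : List (Int × Int)) : Decidable (Spec_find_intervals sequence out) := by unfold Spec_find_intervals; infer_instance

-- ===== CLAIM (what is proved, stated in full; the proofs are below) =====
def Claim_equal_find_intervals : Prop := ∀ (sequence : List String), Dom_find_intervals sequence → Spec_find_intervals sequence (find_intervals sequence)

-- ===== LEMMAS AND PROOFS =====

-- ===== VERDICT (by name: the statement is the Claim_ definition above) =====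
-- skipping one element of a non-"h" run does not change fiGoB's result
lemma fiGoB_skip (s : String) (rest : List String) (i : Int) (hs : s ≠ "h") :
    fiGoB (s :: rest) i = fiGoB rest (i + 1) := by
  rw [fiGoB]
  simp only [beq_iff_eq, hs, if_false, List.nil_append]
  cases rest with
  | nil => simp [fiGoB]
  | cons t r2 =>
    by_cases ht : t = s
    · subst ht
      rw [fiGoB]
      simp only [beq_iff_eq, hs, ite_false, List.nil_append,
        List.takeWhile_cons_of_pos, List.dropWhile_cons_of_pos, beq_self_eq_true,
        List.length_cons]
      have harith : i + (1 + ((r2.takeWhile (· == t)).length + 1 : Nat)) =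
          i + 1 + (1 + ((r2.takeWhile (· == t)).length : Int)) := by push_cast; ring
      rw [harith]
    · simp [List.takeWhile_cons_of_neg, List.dropWhile_cons_of_neg, ht]

-- main invariant: fiGoA's two modes against fiGoB
lemma fiGoA_eq (seq : List String) :
    (∀ i acc beg, fiGoA seq i acc false beg = acc ++ fiGoB seq i) ∧
    (∀ i acc beg, fiGoA seq i acc true beg =
      acc ++ (beg, i + ((seq.takeWhile (· == "h")).length : Int)) ::
        fiGoB (seq.dropWhile (· == "h")) (i + ((seq.takeWhile (· == "h")).length : Int))) := by
  induction seq with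
  | nil => simp [fiGoA, fiGoB]
  | cons s rest ih =>
    by_cases hs : s = "h"
    · subst hs
      have harith : ∀ j : Int, j + 1 + ((rest.takeWhile (· == "h")).length : Int) =
          j + (((rest.takeWhile (· == "h")).length + 1 : Nat) : Int) := by
        intro j; push_cast; ring
      constructor
      · intro i acc beg
        rw [fiGoA]
        simp only [beq_self_eq_true, ite_true, Bool.not_false]
        rw [ih.2 (i + 1) acc (i + 1), fiGoB]
        simp only [beq_self_eq_true, ite_true, List.singleton_append]
        rw [harith i]
        push_cast
        ring_nf
      · intro i acc beg
        rw [fiGoA]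
        simp only [beq_self_eq_true, ite_true, Bool.not_true, Bool.false_eq_true, ite_false]
        rw [ih.2 (i + 1) acc beg]
        simp only [List.takeWhile_cons_of_pos, List.dropWhile_cons_of_pos,
          beq_self_eq_true, List.length_cons]
        rw [harith i]
    · constructor
      · intro i acc beg
        rw [fiGoA]
        simp only [beq_iff_eq, hs, ite_false, Bool.false_eq_true]
        rw [ih.1 (i + 1) acc beg, fiGoB_skip s rest i hs]
      · intro i acc beg
        rw [fiGoA]
        simp only [beq_iff_eq, hs, ite_false, ite_true]
        rw [ih.1 (i + 1) (acc ++ [(beg, i)]) beg, ← fiGoB_skip s rest i hs]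
        simp [List.takeWhile_cons_of_neg, List.dropWhile_cons_of_neg, hs]

theorem find_intervals_spec : Claim_equal_find_intervals := by
  intro seq _
  unfold Spec_find_intervals find_intervals find_intervals_alt
  simpa using (fiGoA_eq seq).1 0 [] 0
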